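-- pv_equiv track=rewrite | github.com/branku7/Gait-Metrics-Extraction | scripts/detection_ic_fc.py | optimize_IC_FCs
-- ===== SOURCE A (Python) =====
-- def optimize_IC_FCs(IC, FC):
--     """
--     Optimization function does the following steps:
--
--     1) It initiates the first IC
--     2) First FC has to the first after IC[0]
--     3) It will loop through most of the ICs and FCs
--     (there are breaks that can happen)
--     4) In case there is no new FC, the loop breaks
--     5) The new IC has to be bigger than last FC and
--     should be between 0.25 and 2.25 seconds after
--     the last IC
--     6) In case there is no new IC, the loop breaks
--     7) The new FC has to be bigger than last IC and
--     should be between 0.25 and 2.25 seconds after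
--     the last FC
--     8) In case an IC finished without a corresponding
--     FC, we take away that IC
--     9) Returns new values
--     """
--     if len(IC) == 0 or len(FC) == 0:
--         return IC, FC
--     new_IC = [IC[0]]
--     new_FC = []
--
--     for i in range(len(FC)):
--         if FC[i] > IC[0]:
--             new_FC = [FC[i]]
--             break
--
--     for k in range(max(len(IC), len(FC))):
--         try:
--             new_FC[k]
--         except: # TODO : Refactor to avoid try except
--             break
--         for i in IC:
--             if (i > new_FC[k]): # & (i > (new_IC[k] + 25)) & (i < (new_IC[k] + 225)):
--                 new_IC.append(i)
--                 break
--         try: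
--             new_IC[k + 1]
--         except: # TODO : Refactor to avoid try except
--             break
--         for j in FC:
--             if (j > new_IC[k + 1]): # & (j > (new_FC[k] + 25)) & (j < (new_FC[k] + 225)):
--                 new_FC.append(j)
--                 break
--     if (len(new_IC) - 1) == (len(new_FC)):
--         new_IC = new_IC[:-1]
--
--     return new_IC, new_FC
-- ===== SOURCE B (Python) =====
-- def optimize_IC_FCs(IC, FC):
--     """Two monotone pointers: each 'first element greater than threshold' index
--     is nondecreasing as the thresholds strictly increase, so we resume each
--     scan where the previous one stopped (O(len(IC)+len(FC)) instead of O(n^2))."""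
--     if len(IC) == 0 or len(FC) == 0:
--         return IC, FC
--     new_IC = [IC[0]]
--     new_FC = []
--     q = 0
--     while q < len(FC) and FC[q] <= IC[0]:
--         q += 1
--     p = 0
--     while q < len(FC):
--         new_FC.append(FC[q])
--         t = FC[q]
--         q += 1
--         while p < len(IC) and IC[p] <= t:
--             p += 1
--         if p == len(IC):
--             break
--         new_IC.append(IC[p])
--         t = IC[p]
--         p += 1
--         while q < len(FC) and FC[q] <= t:
--             q += 1
--     if len(new_IC) - 1 == len(new_FC):
--         new_IC = new_IC[:-1]
--     return new_IC, new_FC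
-- ===== Notes on version B (the rewrite author's own statement) =====
-- stated objective: faster
-- what changed: Replaced the per-round full rescans of IC and FC (each round of A's k-loop re-scans both full lists from index 0) by two monotone pointers that resume each scan where the previous one stopped, valid because the thresholds strictly increase so the 'first element greater than t' index is nondecreasing.
import Mathlib
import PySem

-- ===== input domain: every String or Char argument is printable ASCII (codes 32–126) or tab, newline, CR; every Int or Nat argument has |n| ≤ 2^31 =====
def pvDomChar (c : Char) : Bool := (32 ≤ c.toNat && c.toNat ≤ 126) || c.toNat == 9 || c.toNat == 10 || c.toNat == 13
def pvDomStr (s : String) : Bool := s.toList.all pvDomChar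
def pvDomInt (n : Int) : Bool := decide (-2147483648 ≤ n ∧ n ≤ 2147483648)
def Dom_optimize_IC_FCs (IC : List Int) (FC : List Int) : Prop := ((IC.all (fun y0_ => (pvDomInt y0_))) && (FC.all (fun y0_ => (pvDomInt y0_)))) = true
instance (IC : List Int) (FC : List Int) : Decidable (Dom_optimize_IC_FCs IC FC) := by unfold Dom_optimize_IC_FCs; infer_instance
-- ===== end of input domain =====

-- B replaces A's per-round full rescans of IC and FC by two monotone pointers
-- (suffix lists) that resume each scan where the previous one stopped (faster per
-- a timing run; equivalence of the return value proved below).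

-- ===== PORT A =====
-- 'for x in xs: if x > t: <take x>; break'  (used three times in A)
def firstGT (t : Int) : List Int → Option Int
  | [] => none
  | x :: xs => if x > t then some x else firstGT t xs

-- 'for k in range(max(len(IC), len(FC))): ...' with the two try/except breaks
def aLoop (IC FC : List Int) : Nat → Nat → List Int → List Int → List Int × List Int
  | 0, _, nic, nfc => (nic, nfc)
  | fuel+1, k, nic, nfc =>
    match nfc[k]? with
    | none => (nic, nfc)                                  -- except: break
    | some fck =>
      let nic' := match firstGT fck IC with
        | some i => nic ++ [i]
        | none => nic
      match nic'[k+1]? with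
      | none => (nic', nfc)                               -- except: break
      | some ick1 =>
        let nfc' := match firstGT ick1 FC with
          | some j => nfc ++ [j]
          | none => nfc
        aLoop IC FC fuel (k+1) nic' nfc'

def optimize_IC_FCs (IC : List Int) (FC : List Int) : List Int × List Int :=
  match IC, FC with
  | [], _ => (IC, FC)
  | _, [] => (IC, FC)
  | ic0 :: _, _ :: _ =>
    let new_IC : List Int := [ic0]
    let new_FC : List Int := match firstGT ic0 FC with
      | some f => [f]
      | none => []
    let r := aLoop IC FC (max IC.length FC.length) 0 new_IC new_FC
    if r.1.length - 1 = r.2.length then (r.1.dropLast, r.2) else r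

-- ===== PORT B =====
-- the 'while q < len(FC)' loop of Source B; the pointers p and q are represented by
-- the remaining suffixes icR and fcR, and each inner 'while … <= t: ptr += 1'
-- pointer advance is dropWhile on the suffix
def bLoop (icR fcR nic nfc : List Int) : List Int × List Int :=
  match fcR with
  | [] => (nic, nfc)
  | f :: fcR' =>
    match icR.dropWhile (fun x => decide (x ≤ f)) with
    | [] => (nic, nfc ++ [f])
    | i :: icR'' =>
      bLoop icR'' (fcR'.dropWhile (fun x => decide (x ≤ i))) (nic ++ [i]) (nfc ++ [f])
termination_by fcR.length
decreasing_by
  simp only [List.length_cons]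
  exact Nat.lt_succ_of_le (List.length_dropWhile_le _ _)

def optimize_IC_FCs_alt (IC : List Int) (FC : List Int) : List Int × List Int :=
  match IC, FC with
  | [], _ => (IC, FC)
  | _, [] => (IC, FC)
  | ic0 :: _, _ :: _ =>
    let r := bLoop IC (FC.dropWhile (fun x => decide (x ≤ ic0))) [ic0] []
    if r.1.length - 1 = r.2.length then (r.1.dropLast, r.2) else r

-- ===== PRECONDITION & SPEC =====
def Spec_optimize_IC_FCs (IC : List Int) (FC : List Int) (out : List Int × List Int) : Prop := out = optimize_IC_FCs_alt IC FC
instance (IC : List Int) (FC : List Int) (out : List Int × List Int) : Decidable (Spec_optimize_IC_FCs IC FC out) := by unfold Spec_optimize_IC_FCs; infer_instance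

-- ===== CLAIM (what is proved, stated in full; the proofs are below) =====
def Claim_equal_optimize_IC_FCs : Prop := ∀ (IC : List Int) (FC : List Int), Dom_optimize_IC_FCs IC FC → Spec_optimize_IC_FCs IC FC (optimize_IC_FCs IC FC)

-- ===== LEMMAS AND PROOFS =====

-- A's linear scan is head-of-dropWhile
lemma firstGT_eq (t : Int) (xs : List Int) :
    firstGT t xs = (xs.dropWhile (fun x => decide (x ≤ t))).head? := by
  induction xs with
  | nil => rfl
  | cons x xs ih =>
    by_cases h : x ≤ t
    · simp [firstGT, h, not_lt.mpr h, ih]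
    · simp [firstGT, h, not_le.mp h]

lemma dropWhile_le_dropWhile_le {s t : Int} (h : s ≤ t) (xs : List Int) :
    (xs.dropWhile (fun x => decide (x ≤ s))).dropWhile (fun x => decide (x ≤ t))
      = xs.dropWhile (fun x => decide (x ≤ t)) := by
  induction xs with
  | nil => rfl
  | cons x xs ih =>
    by_cases hx : x ≤ s
    · simp [hx, le_trans hx h, ih]
    · simp [List.dropWhile_cons, hx]

lemma head_dropWhile_gt {t : Int} {xs : List Int} {y : Int} {ys : List Int}
    (h : xs.dropWhile (fun x => decide (x ≤ t)) = y :: ys) : t < y := by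
  induction xs with
  | nil => simp at h
  | cons x xs ih =>
    by_cases hx : x ≤ t
    · simp [hx] at h; exact ih h
    · simp [hx] at h
      exact h.1 ▸ not_le.mp hx

-- main loop correspondence: A's k-loop with its full-list rescans equals
-- B's two-pointer loop, given the pointer invariants
lemma loop_eq (IC FC : List Int) :
    ∀ (fuel : Nat) (v : Int) (icR fcR nic nfc : List Int),
      nic.length = nfc.length + 1 →
      fcR = FC.dropWhile (fun x => decide (x ≤ v)) →
      fcR.length ≤ fuel →
      (∀ t, v ≤ t → IC.dropWhile (fun x => decide (x ≤ t))
          = icR.dropWhile (fun x => decide (x ≤ t))) →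
      aLoop IC FC fuel nfc.length nic (nfc ++ fcR.take 1) = bLoop icR fcR nic nfc := by
  intro fuel
  induction fuel with
  | zero =>
    intro v icR fcR nic nfc hlen hfc hfuel hic
    have : fcR = [] := List.eq_nil_of_length_eq_zero (Nat.le_zero.mp hfuel)
    subst this
    simp [aLoop, bLoop]
  | succ fuel ih =>
    intro v icR fcR nic nfc hlen hfc hfuel hic
    cases fcR with
    | nil =>
      simp [aLoop, bLoop]
    | cons f fcR' =>
      have hvf : v < f := head_dropWhile_gt hfc.symm
      have hA1 : (nfc ++ [f])[nfc.length]? = some f := List.getElem?_concat_length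
      have hscan : firstGT f IC = (icR.dropWhile (fun x => decide (x ≤ f))).head? := by
        rw [firstGT_eq, hic f (le_of_lt hvf)]
      rw [bLoop]
      cases hdrop : icR.dropWhile (fun x => decide (x ≤ f)) with
      | nil =>
        have hnone : firstGT f IC = none := by rw [hscan, hdrop]; rfl
        have hIdx : nic[nfc.length + 1]? = (none : Option Int) :=
          List.getElem?_eq_none (by omega)
        simp only [List.take_succ_cons, List.take_zero, aLoop, hA1, hnone, hIdx]
      | cons i icR'' =>
        have hfi : f < i := head_dropWhile_gt hdrop
        have hsome : firstGT f IC = some i := by rw [hscan, hdrop]; rfl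
        have hIdx : (nic ++ [i])[nfc.length + 1]? = some i := by
          rw [← hlen]; exact List.getElem?_concat_length
        -- the new FC suffix
        have hfc2 : fcR'.dropWhile (fun x => decide (x ≤ i))
            = FC.dropWhile (fun x => decide (x ≤ i)) := by
          rw [← dropWhile_le_dropWhile_le (le_of_lt (lt_trans hvf hfi)) FC, ← hfc,
              List.dropWhile_cons]
          simp [le_of_lt hfi]
        have hscan2 : firstGT i FC
            = (fcR'.dropWhile (fun x => decide (x ≤ i))).head? := by
          rw [firstGT_eq, hfc2]
        have hic' : ∀ t, i ≤ t → IC.dropWhile (fun x => decide (x ≤ t))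
            = icR''.dropWhile (fun x => decide (x ≤ t)) := by
          intro t hit
          have hft : f ≤ t := le_of_lt (lt_of_lt_of_le hfi hit)
          rw [hic t (le_of_lt (lt_of_lt_of_le (lt_trans hvf hfi) hit)),
              ← dropWhile_le_dropWhile_le hft icR, hdrop, List.dropWhile_cons]
          simp [hit]
        have hrec := ih i icR'' (fcR'.dropWhile (fun x => decide (x ≤ i)))
            (nic ++ [i]) (nfc ++ [f])
            (by simp [hlen]) hfc2
            (le_trans (List.length_dropWhile_le _ _) (by simp at hfuel; omega)) hic'
        have hlen2 : (nfc ++ [f]).length = nfc.length + 1 := by simp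
        rw [hlen2] at hrec
        -- A's step: nfc' = (nfc ++ [f]) ++ (new suffix).take 1
        cases hfc2' : fcR'.dropWhile (fun x => decide (x ≤ i)) with
        | nil =>
          have hn : firstGT i FC = none := by rw [hscan2, hfc2']; rfl
          rw [hfc2'] at hrec
          simp only [List.take_succ_cons, List.take_zero, aLoop, hA1, hsome, hIdx, hn,
            List.take_nil, List.append_nil] at hrec ⊢
          rw [hfc2']
          exact hrec
        | cons g gs =>
          have hg : firstGT i FC = some g := by rw [hscan2, hfc2']; rfl
          rw [hfc2'] at hrec
          simp only [List.take_succ_cons, List.take_zero, aLoop, hA1, hsome, hIdx, hg,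
            List.append_assoc, List.singleton_append] at hrec ⊢
          rw [hfc2']
          exact hrec

lemma main_eq (IC FC : List Int) : optimize_IC_FCs IC FC = optimize_IC_FCs_alt IC FC := by
  cases IC with
  | nil => rfl
  | cons ic0 icT =>
    cases FC with
    | nil => rfl
    | cons f0 fcT =>
      have hinit : (match firstGT ic0 (f0 :: fcT) with
            | some f => [f] | none => ([] : List Int))
          = ((f0 :: fcT).dropWhile (fun x => decide (x ≤ ic0))).take 1 := by
        rw [firstGT_eq]
        cases (f0 :: fcT).dropWhile (fun x => decide (x ≤ ic0)) <;> simp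
      have h := loop_eq (ic0 :: icT) (f0 :: fcT)
        (max (ic0 :: icT).length (f0 :: fcT).length) ic0 (ic0 :: icT)
        ((f0 :: fcT).dropWhile (fun x => decide (x ≤ ic0))) [ic0] []
        (by simp) rfl
        (le_trans (List.length_dropWhile_le _ _) (le_max_right _ _))
        (fun t _ => rfl)
      simp only [List.nil_append, List.length_nil] at h
      simp only [optimize_IC_FCs, optimize_IC_FCs_alt, hinit, h]

-- ===== VERDICT (by name: the statement is the Claim_ definition above) =====
theorem optimize_IC_FCs_spec : Claim_equal_optimize_IC_FCs := by
  intro IC FC _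
  unfold Spec_optimize_IC_FCs
  exact main_eq IC FC
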